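-- pv_equiv track=rewrite | github.com/AndrewDorse/KNG3 | shaman_v1_engine.py | _index_last_fully_closed_bar
-- ===== SOURCE A (Python) =====
-- def _index_last_fully_closed_bar(opens_ms: list[int], interval_ms: int, now_ms: int) -> int | None:
--     """Index of the most recent kline whose interval has fully ended (Binance bar open = start time).
--
--     Default REST behavior: the last row is the **in-progress** candle, so the last *fully* closed
--     bar is at ``len-2``. Some feeds / mirrors return **only completed** rows; then the last row is
--     already closed and the signal bar is at ``len-1``. Using ``len-2`` in that case evaluates the
--     **previous** period — rules look "dead" (nG=nR=0) while the candle still moves on the chart.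
--     """
--     if len(opens_ms) < 2:
--         return None
--     im = int(interval_ms)
--     nm = int(now_ms)
--     for i in range(len(opens_ms) - 1, -1, -1):
--         if int(opens_ms[i]) + im <= nm:
--             return i
--     return None
-- ===== SOURCE B (Python) =====
-- def _index_last_fully_closed_bar(opens_ms: list[int], interval_ms: int, now_ms: int) -> int | None:
--     """Single forward pass: remember the last index whose bar already ended (open <= now - interval)."""
--     if len(opens_ms) < 2:
--         return None
--     cutoff = int(now_ms) - int(interval_ms)
--     best = None
--     for i, o in enumerate(opens_ms):
--         if int(o) <= cutoff:
--             best = i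
--     return best
-- ===== Notes on version B (the rewrite author's own statement) =====
-- stated objective: alternative
-- what changed: Replaces A's backward scan with early return by a single forward pass that rearranges the inequality to a precomputed cutoff and keeps the last matching index in an accumulator.
import Mathlib
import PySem

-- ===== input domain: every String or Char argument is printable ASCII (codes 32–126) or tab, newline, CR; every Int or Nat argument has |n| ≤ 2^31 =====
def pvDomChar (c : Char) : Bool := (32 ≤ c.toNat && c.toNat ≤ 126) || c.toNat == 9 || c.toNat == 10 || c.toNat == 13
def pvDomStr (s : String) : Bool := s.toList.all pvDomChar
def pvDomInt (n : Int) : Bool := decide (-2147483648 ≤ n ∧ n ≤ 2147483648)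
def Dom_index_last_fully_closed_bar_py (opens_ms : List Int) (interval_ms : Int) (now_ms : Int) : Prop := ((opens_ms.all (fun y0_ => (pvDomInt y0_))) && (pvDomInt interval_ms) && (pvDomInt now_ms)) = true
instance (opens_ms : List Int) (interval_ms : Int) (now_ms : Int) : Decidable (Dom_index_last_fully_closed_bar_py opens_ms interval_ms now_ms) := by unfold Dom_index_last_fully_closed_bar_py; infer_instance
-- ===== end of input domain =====

-- B replaces A's backward early-return scan by a forward pass keeping the last matching index; return values agree everywhere.
-- ===== PORT A =====
-- A's `for i in range(len-1, -1, -1): if opens[i]+im<=nm: return i`, as a countdown recursion on i+1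
def aLoop (opens_ms : List Int) (im nm : Int) : Nat → Option Int
  | 0 => none
  | k + 1 => if opens_ms.getD k 0 + im ≤ nm then some (k : Int) else aLoop opens_ms im nm k

def index_last_fully_closed_bar_py (opens_ms : List Int) (interval_ms : Int) (now_ms : Int) : Option Int :=
  if opens_ms.length < 2 then none
  else aLoop opens_ms interval_ms now_ms opens_ms.length

-- ===== PORT B =====
-- B's `for i, o in enumerate(...): if o <= cutoff: best = i` as a foldl over the enumerated list
def index_last_fully_closed_bar_py_alt (opens_ms : List Int) (interval_ms : Int) (now_ms : Int) : Option Int :=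
  if opens_ms.length < 2 then none
  else
    (PySem.List.enumerate opens_ms 0).foldl
      (fun best p => if p.2 ≤ now_ms - interval_ms then some p.1 else best) none

-- ===== PRECONDITION & SPEC =====
def Spec_index_last_fully_closed_bar_py (opens_ms : List Int) (interval_ms : Int) (now_ms : Int) (out : Option Int) : Prop := out = index_last_fully_closed_bar_py_alt opens_ms interval_ms now_ms
instance (opens_ms : List Int) (interval_ms : Int) (now_ms : Int) (out : Option Int) : Decidable (Spec_index_last_fully_closed_bar_py opens_ms interval_ms now_ms out) := by unfold Spec_index_last_fully_closed_bar_py; infer_instance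

-- ===== CLAIM (what is proved, stated in full; the proofs are below) =====
def Claim_equal_index_last_fully_closed_bar_py : Prop := ∀ (opens_ms : List Int) (interval_ms : Int) (now_ms : Int), Dom_index_last_fully_closed_bar_py opens_ms interval_ms now_ms → Spec_index_last_fully_closed_bar_py opens_ms interval_ms now_ms (index_last_fully_closed_bar_py opens_ms interval_ms now_ms)

-- ===== LEMMAS AND PROOFS =====

-- aLoop only inspects indices below its counter, so appending an element does not change it
lemma aLoop_append (opens_ms : List Int) (im nm x : Int) (k : Nat) (hk : k ≤ opens_ms.length) :
    aLoop (opens_ms ++ [x]) im nm k = aLoop opens_ms im nm k := by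
  induction k with
  | zero => rfl
  | succ k ih =>
    have hk' : k < opens_ms.length := hk
    simp only [aLoop, List.getD_append _ _ _ _ hk', ih (Nat.le_of_lt hk')]

lemma loops_eq (im nm : Int) (opens_ms : List Int) :
    aLoop opens_ms im nm opens_ms.length =
      (PySem.List.enumerate opens_ms 0).foldl
        (fun best p => if p.2 ≤ nm - im then some p.1 else best) none := by
  induction opens_ms using List.reverseRecOn with
  | nil => rfl
  | append_singleton l x ih =>
    have hlen : (l ++ [x]).length = l.length + 1 := by simp
    rw [hlen]
    have hget : (l ++ [x]).getD l.length 0 = x := by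
      simp [List.getD_eq_getElem?_getD]
    have hcond : (l ++ [x]).getD l.length 0 + im ≤ nm ↔ x ≤ nm - im := by
      rw [hget]; omega
    simp only [aLoop, PySem.List.enumerate_append, List.foldl_append,
      aLoop_append l im nm x l.length (le_refl _), ih, PySem.List.enumerate_cons,
      PySem.List.enumerate_nil, List.foldl_cons, List.foldl_nil]
    by_cases h : x ≤ nm - im
    · rw [if_pos (hcond.mpr h), if_pos h]
      simp
    · rw [if_neg (fun hc => h (hcond.mp hc)), if_neg h]

-- ===== VERDICT =====
theorem index_last_fully_closed_bar_py_spec : Claim_equal_index_last_fully_closed_bar_py := by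
  intro opens_ms interval_ms now_ms _
  unfold Spec_index_last_fully_closed_bar_py index_last_fully_closed_bar_py index_last_fully_closed_bar_py_alt
  by_cases h : opens_ms.length < 2
  · simp [h]
  · simp only [h, if_false]
    exact loops_eq interval_ms now_ms opens_ms
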